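-- pv_equiv track=rewrite | github.com/Sundaylog/FileOperator | FileOperator.py | changekey
-- ===== SOURCE A (Python) =====
-- def changekey(key):
--     key_list=[]
--     while len(key) % 4 != 0:
--         key+="0"
--     xorTime=int(len(key)/4)
--     for i in range(len(key)):
--         key_list.append(ord(key[i]))
--     for i in range(1,xorTime):
--         key_list[0] = key_list[0] ^ key_list[4 * i]
--         key_list[1] = key_list[1] ^ key_list[4 * i + 1]
--         key_list[2] = key_list[2] ^ key_list[4 * i + 2]
--         key_list[3] = key_list[3] ^ key_list[4 * i + 3]
--     FinalKey=key_list[0:4]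
--     return FinalKey
-- ===== SOURCE B (Python) =====
-- def changekey(key):
--     if len(key) % 4:
--         key += "0" * (4 - len(key) % 4)
--     chunks = [[ord(c) for c in key[i:i + 4]] for i in range(0, len(key), 4)]
--     result = []
--     for col in zip(*chunks):
--         v = 0
--         for x in col:
--             v ^= x
--         result.append(v)
--     return result
-- ===== Notes on version B (the rewrite author's own statement) =====
-- stated objective: alternative
-- what changed: Replaces the in-place indexed XOR-update loop over a flat ord list by padding in one step, chunking into 4-char groups, transposing with zip(*chunks) and XOR-folding each column.
import Mathlib
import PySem

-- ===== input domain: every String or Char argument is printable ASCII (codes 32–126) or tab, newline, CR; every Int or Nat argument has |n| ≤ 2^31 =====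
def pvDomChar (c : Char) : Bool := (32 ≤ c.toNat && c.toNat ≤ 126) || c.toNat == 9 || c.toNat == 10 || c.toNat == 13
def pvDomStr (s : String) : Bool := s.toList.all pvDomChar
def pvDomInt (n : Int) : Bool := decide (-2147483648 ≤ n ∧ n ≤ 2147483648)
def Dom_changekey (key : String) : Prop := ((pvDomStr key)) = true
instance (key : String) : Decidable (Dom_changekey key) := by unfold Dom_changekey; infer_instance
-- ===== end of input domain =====

-- B replaces A's in-place indexed XOR-update loop by chunking the padded key into
-- 4-char groups, transposing them and XOR-folding each column (alternative decomposition).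


-- ===== PORT A =====
-- while len(key) % 4 != 0: key += "0"
def padA (cs : List Char) : List Char :=
  if cs.length % 4 ≠ 0 then padA (cs ++ ['0']) else cs
termination_by (4 - cs.length % 4) % 4
decreasing_by simp only [List.length_append, List.length_cons, List.length_nil]; omega

-- one iteration of A's for-loop: the four XOR-update statements; indices 0..3 and
-- 4*i..4*i+3 are always in range when the Python loop runs, so the total
-- pySetD / pyGetD (default 0) forms are exact here.
def stepA (l : List Int) (i : Int) : List Int :=
  let l1 := PySem.List.pySetD l 0 (PySem.Int.bxor (PySem.List.pyGetD l 0 0) (PySem.List.pyGetD l (4*i) 0))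
  let l2 := PySem.List.pySetD l1 1 (PySem.Int.bxor (PySem.List.pyGetD l1 1 0) (PySem.List.pyGetD l1 (4*i+1) 0))
  let l3 := PySem.List.pySetD l2 2 (PySem.Int.bxor (PySem.List.pyGetD l2 2 0) (PySem.List.pyGetD l2 (4*i+2) 0))
  PySem.List.pySetD l3 3 (PySem.Int.bxor (PySem.List.pyGetD l3 3 0) (PySem.List.pyGetD l3 (4*i+3) 0))

def changekey (key : String) : List Int :=
  let padded := padA key.toList
  -- int(len(key)/4): the float division is exact because the length is divisible by 4
  let xorTime : Int := ((padded.length / 4 : Nat) : Int)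
  let keyList := padded.map (fun c => (c.toNat : Int))
  let keyList := (PySem.List.pyRange 1 xorTime 1).foldl stepA keyList
  PySem.List.slice keyList (some 0) (some 4)

-- ===== PORT B =====
def padB (cs : List Char) : List Char :=
  if cs.length % 4 ≠ 0 then cs ++ List.replicate (4 - cs.length % 4) '0' else cs

-- zip(*xss): emit the heads of all lists while every list is nonempty (Python zip
-- stops at the shortest iterator); headD's default is never used under the guard.
def zipStar (xss : List (List Int)) : List (List Int) :=
  match xss with
  | [] => []
  | x :: rest =>
    if h : x ≠ [] ∧ rest.all (fun l => !l.isEmpty) then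
      (x :: rest).map (fun l => l.headD 0) :: zipStar (x.tail :: rest.map List.tail)
    else []
termination_by (fun xss => match xss with | [] => 0 | x :: _ => x.length) xss
decreasing_by
  cases x with
  | nil => exact absurd rfl h.1
  | cons a t => simp

def changekey_alt (key : String) : List Int :=
  let cs := padB key.toList
  let chunks := (PySem.List.pyRange 0 (cs.length : Int) 4).map
      (fun i => (PySem.List.slice cs (some i) (some (i + 4))).map (fun c => (c.toNat : Int)))
  (zipStar chunks).map (fun col => col.foldl (fun v x => PySem.Int.bxor v x) 0)

-- ===== PRECONDITION & SPEC =====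
def Spec_changekey (key : String) (out : List Int) : Prop := out = changekey_alt key
instance (key : String) (out : List Int) : Decidable (Spec_changekey key out) := by unfold Spec_changekey; infer_instance

-- ===== CLAIM (what is proved, stated in full; the proofs are below) =====
def Claim_equal_changekey : Prop := ∀ (key : String), Dom_changekey key → Spec_changekey key (changekey key)

-- ===== LEMMAS AND PROOFS =====

lemma padA_eq (cs : List Char) :
    padA cs = cs ++ List.replicate ((4 - cs.length % 4) % 4) '0' := by
  fun_induction padA cs with
  | case1 cs h ih =>
    rw [ih]
    have h2 : (4 - cs.length % 4) % 4 = ((4 - (cs ++ ['0']).length % 4) % 4) + 1 := by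
      simp only [List.length_append, List.length_cons, List.length_nil]; omega
    rw [h2, List.replicate_succ]
    simp
  | case2 cs h =>
    simp only [ne_eq, not_not] at h
    rw [show (4 - cs.length % 4) % 4 = 0 by omega, List.replicate_zero, List.append_nil]

lemma padB_eq (cs : List Char) :
    padB cs = cs ++ List.replicate ((4 - cs.length % 4) % 4) '0' := by
  unfold padB
  by_cases h : cs.length % 4 = 0
  · rw [if_neg (by omega), show (4 - cs.length % 4) % 4 = 0 by omega,
      List.replicate_zero, List.append_nil]
  · rw [if_pos (by omega), show (4 - cs.length % 4) % 4 = 4 - cs.length % 4 by omega]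

lemma padA_mod (cs : List Char) : (padA cs).length % 4 = 0 := by
  rw [padA_eq]
  simp only [List.length_append, List.length_replicate]
  omega

lemma getD4 (t : List Int) (w x y z : Int) (n : Nat) :
    (w::x::y::z::t).getD (4+n) 0 = t.getD n 0 := by
  show ([w,x,y,z] ++ t).getD (4+n) 0 = t.getD n 0
  simp only [List.getD, List.getElem?_append_right (by simp : [w,x,y,z].length ≤ 4+n)]
  simp

lemma getD_drop (L : List Int) (i n : Nat) :
    (L.drop i).getD n 0 = L.getD (i + n) 0 := by
  simp [List.getD, List.getElem?_drop]

lemma take4_drop (L : List Int) (i : Nat) (h : i + 4 ≤ L.length) :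
    (L.drop i).take 4 = [L.getD i 0, L.getD (i+1) 0, L.getD (i+2) 0, L.getD (i+3) 0] := by
  rw [List.drop_eq_getElem_cons (by omega), List.drop_eq_getElem_cons (i := i+1) (by omega),
      List.drop_eq_getElem_cons (i := i+2) (by omega), List.drop_eq_getElem_cons (i := i+3) (by omega)]
  simp only [List.take_succ_cons, List.take_zero,
        List.getD_eq_getElem L 0 (by omega : i < L.length),
        List.getD_eq_getElem L 0 (by omega : i+1 < L.length),
        List.getD_eq_getElem L 0 (by omega : i+2 < L.length),
        List.getD_eq_getElem L 0 (by omega : i+3 < L.length)]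

lemma stepA_eval (t : List Int) (a b c d : Int) (k : Nat) :
    stepA ([a,b,c,d] ++ t) (1 + (k : Int)) =
      [PySem.Int.bxor a (t.getD (4*k) 0), PySem.Int.bxor b (t.getD (4*k+1) 0),
       PySem.Int.bxor c (t.getD (4*k+2) 0), PySem.Int.bxor d (t.getD (4*k+3) 0)] ++ t := by
  have e0 : 4 * (1 + (k:Int)) = ((4 + 4*k : Nat) : Int) := by push_cast; ring
  have e1 : 4 * (1 + (k:Int)) + 1 = ((4 + (4*k+1) : Nat) : Int) := by push_cast; ring
  have e2 : 4 * (1 + (k:Int)) + 2 = ((4 + (4*k+2) : Nat) : Int) := by push_cast; ring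
  have e3 : 4 * (1 + (k:Int)) + 3 = ((4 + (4*k+3) : Nat) : Int) := by push_cast; ring
  simp only [stepA]
  rw [e1, e2, e3, e0]
  simp only [PySem.List.pyGetD_natCast, PySem.List.pyGetD_ofNat', PySem.List.pySetD_of_nonneg,
    show ((0:Int) ≤ 0) = True by simp, show ((0:Int) ≤ 1) = True by simp,
    show ((0:Int) ≤ 2) = True by simp, show ((0:Int) ≤ 3) = True by simp]
  simp only [show ((0:Int).toNat) = 0 from rfl, show ((1:Int).toNat) = 1 from rfl,
    show ((2:Int).toNat) = 2 from rfl, show ((3:Int).toNat) = 3 from rfl,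
    List.cons_append, List.nil_append, List.set]
  simp only [getD4]
  simp [List.getD]

lemma foldA_close (ks : List Nat) (t : List Int) (a b c d : Int) :
    ks.foldl (fun l (k : Nat) => stepA l (1 + (k : Int))) ([a,b,c,d] ++ t) =
      [ks.foldl (fun v k => PySem.Int.bxor v (t.getD (4*k) 0)) a,
       ks.foldl (fun v k => PySem.Int.bxor v (t.getD (4*k+1) 0)) b,
       ks.foldl (fun v k => PySem.Int.bxor v (t.getD (4*k+2) 0)) c,
       ks.foldl (fun v k => PySem.Int.bxor v (t.getD (4*k+3) 0)) d] ++ t := by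
  induction ks generalizing a b c d with
  | nil => simp
  | cons k ks ih =>
    simp only [List.foldl_cons, stepA_eval]
    exact ih _ _ _ _

lemma zipStar_step (cs : List (List Int)) (hne : cs ≠ []) (h : ∀ c ∈ cs, c ≠ []) :
    zipStar cs = cs.map (fun l => l.headD 0) :: zipStar (cs.map List.tail) := by
  cases cs with
  | nil => exact absurd rfl hne
  | cons x rest =>
    rw [zipStar]
    rw [dif_pos ⟨h x (by simp), by
      simp only [List.all_eq_true]
      intro l hl
      simpa [List.isEmpty_iff] using h l (by simp [hl])⟩]
    rfl

lemma zipStar_empties (cs : List (List Int)) (h : ∀ c ∈ cs, c = []) : zipStar cs = [] := by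
  cases cs with
  | nil => rw [zipStar]
  | cons x rest =>
    have hx : x = [] := h x (by simp)
    subst hx
    rw [zipStar, dif_neg (by simp)]

lemma zipStar_quads (qs : List (Int × Int × Int × Int)) (hne : qs ≠ []) :
    zipStar (qs.map (fun q => [q.1, q.2.1, q.2.2.1, q.2.2.2])) =
      [qs.map (·.1), qs.map (·.2.1), qs.map (·.2.2.1), qs.map (·.2.2.2)] := by
  have hmapne : ∀ (f : Int × Int × Int × Int → List Int), qs.map f ≠ [] := by
    intro f; simpa using hne
  rw [zipStar_step _ (hmapne _) (by rintro c hc; obtain ⟨q, _, rfl⟩ := List.mem_map.mp hc; simp)]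
  simp only [List.map_map, Function.comp_def, List.headD_cons, List.tail_cons]
  rw [zipStar_step _ (hmapne _) (by rintro c hc; obtain ⟨q, _, rfl⟩ := List.mem_map.mp hc; simp)]
  simp only [List.map_map, Function.comp_def, List.headD_cons, List.tail_cons]
  rw [zipStar_step _ (hmapne _) (by rintro c hc; obtain ⟨q, _, rfl⟩ := List.mem_map.mp hc; simp)]
  simp only [List.map_map, Function.comp_def, List.headD_cons, List.tail_cons]
  rw [zipStar_step _ (hmapne _) (by rintro c hc; obtain ⟨q, _, rfl⟩ := List.mem_map.mp hc; simp)]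
  simp only [List.map_map, Function.comp_def, List.headD_cons, List.tail_cons]
  rw [zipStar_empties _ (by rintro c hc; obtain ⟨q, _, rfl⟩ := List.mem_map.mp hc; rfl)]

lemma col_bridge (L : List Int) (n j : Nat) :
    ((List.range (n+1)).map (fun k => L.getD (4*k+j) 0)).foldl (fun v x => PySem.Int.bxor v x) 0 =
      (List.range n).foldl (fun v k => PySem.Int.bxor v ((L.drop 4).getD (4*k+j) 0)) (L.getD j 0) := by
  rw [List.foldl_map, List.range_succ_eq_map, List.foldl_cons, List.foldl_map]
  have h0 : 4*0+j = j := by omega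
  rw [h0, PySem.Int.bxor_comm, PySem.Int.bxor_zero]
  have hfun : ∀ (f g : Int → Nat → Int), f = g → ∀ (i : Int) (l : List Nat), l.foldl f i = l.foldl g i := by
    rintro f g rfl i l; rfl
  apply hfun
  funext v k
  rw [getD_drop]
  congr 2
  omega

lemma slice04 (t : List Int) (w x y z : Int) :
    PySem.List.slice ([w,x,y,z] ++ t) (some 0) (some 4) = [w,x,y,z] := by
  simp [pysem]

lemma core_eq (p : List Char) (hp : p.length % 4 = 0) :
    PySem.List.slice
        ((PySem.List.pyRange 1 ((p.length / 4 : Nat) : Int) 1).foldl stepA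
          (p.map (fun c => (c.toNat : Int)))) (some 0) (some 4)
      = (zipStar ((PySem.List.pyRange 0 (p.length : Int) 4).map
            (fun i => (PySem.List.slice p (some i) (some (i + 4))).map
              (fun c => (c.toNat : Int))))).map
          (fun col => col.foldl (fun v x => PySem.Int.bxor v x) 0) := by
  obtain ⟨m, hm⟩ : ∃ m, p.length = 4*m := ⟨p.length/4, by omega⟩
  set L := p.map (fun c => (c.toNat : Int)) with hL
  have hLlen : L.length = 4*m := by simp [hL, hm]
  cases m with
  | zero =>
    have hp0 : p = [] := List.length_eq_zero_iff.mp (by omega)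
    subst hp0
    rw [show ((([] : List Char).length / 4 : Nat) : Int) = 0 by simp]
    rw [PySem.List.pyRange_one_eq_nil (by norm_num)]
    simp only [List.foldl_nil]
    rw [show ((([] : List Char).length : Nat) : Int) = 0 by simp]
    rw [PySem.List.pyRange_of_pos _ _ (by norm_num : (0:Int) < 4)]
    simp only [if_neg (by norm_num : ¬ (0:Int) < 0), List.range_zero, List.map_nil]
    rw [zipStar]
    simp [hL, PySem.List.slice]
  | succ n =>
    -- ===== A side =====
    have hA0 : ((p.length / 4 : Nat) : Int) = ((n+1 : Nat) : Int) := by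
      rw [hm]; congr 1; omega
    rw [hA0, PySem.List.pyRange_one]
    rw [show (((n+1 : Nat) : Int) - 1).toNat = n by omega]
    rw [List.foldl_map]
    have hsplit : L = [L.getD 0 0, L.getD 1 0, L.getD 2 0, L.getD 3 0] ++ L.drop 4 := by
      conv_lhs => rw [← List.take_append_drop 4 L]
      rw [show L.take 4 = (L.drop 0).take 4 by rw [List.drop_zero],
          take4_drop L 0 (by omega)]
    rw [hsplit, foldA_close]
    rw [slice04]
    -- ===== B side =====
    have hB0 : PySem.List.pyRange 0 ((p.length : Nat) : Int) 4 =
        (List.range (n+1)).map (fun k => ((4*k : Nat) : Int)) := by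
      rw [PySem.List.pyRange_of_pos _ _ (by norm_num : (0:Int) < 4), hm]
      rw [if_pos (by positivity)]
      rw [show ((((4*(n+1) : Nat) : Int) - 0 + 4 - 1)/4).toNat = n+1 by omega]
      apply List.map_congr_left
      intro k _
      push_cast
      ring
    rw [hB0, List.map_map]
    have hchunks : (List.range (n+1)).map
          ((fun i => (PySem.List.slice p (some i) (some (i + 4))).map (fun c => (c.toNat : Int))) ∘
            (fun k => ((4*k : Nat) : Int))) =
        ((List.range (n+1)).map (fun k =>
          (L.getD (4*k) 0, L.getD (4*k+1) 0, L.getD (4*k+2) 0, L.getD (4*k+3) 0))).map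
          (fun q => [q.1, q.2.1, q.2.2.1, q.2.2.2]) := by
      rw [List.map_map]
      apply List.map_congr_left
      intro k hk
      have hk' : k < n+1 := List.mem_range.mp hk
      simp only [Function.comp_apply]
      rw [show ((4*k : Nat) : Int) + 4 = ((4*k : Nat) : Int) + ((4 : Nat) : Int) by norm_num,
          PySem.List.slice_natCast_add]
      rw [List.map_take, List.map_drop, ← hL]
      rw [take4_drop L (4*k) (by omega)]
    rw [hchunks, zipStar_quads _ (by simp)]
    simp only [List.map_cons, List.map_nil, List.map_map, Function.comp_def]
    -- ===== bridge =====
    have hb0 := col_bridge L n 0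
    have hb1 := col_bridge L n 1
    have hb2 := col_bridge L n 2
    have hb3 := col_bridge L n 3
    simp only [Nat.add_zero] at hb0
    rw [hb0, hb1, hb2, hb3]

-- ===== VERDICT (by name: the statement is the Claim_ definition above) =====
theorem changekey_spec : Claim_equal_changekey := by
  intro key _
  unfold Spec_changekey changekey changekey_alt
  rw [padB_eq, ← padA_eq]
  exact core_eq (padA key.toList) (padA_mod key.toList)
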